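-- pv_equiv track=rewrite | github.com/ZydreEZ/duplicated-invoices-finder | search_duplicated_invoices.py | find_duplicated_invoices
-- ===== SOURCE A (Python) =====
-- def find_duplicated_invoices(same_amount_date, same_amount_reference):
--     duplicated_pairs = []
--     invoices_index = 0
--     while invoices_index < len(same_amount_reference):
--         if same_amount_reference[invoices_index] in same_amount_date:
--             temp_pair_value = same_amount_reference.pop(invoices_index)
--             duplicated_pairs.append(temp_pair_value)
--             same_amount_date.remove(temp_pair_value)
--         else:
--             invoices_index += 1
--     return duplicated_pairs, same_amount_date, same_amount_reference
-- ===== SOURCE B (Python) =====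
-- def find_duplicated_invoices(same_amount_date, same_amount_reference):
--     # Multiplicity counter over the date list: one O(1)-lookup pass over each list
--     # instead of A's repeated O(n) membership / remove scans.
--     cnt = {}
--     for x in same_amount_date:
--         cnt[x] = cnt.get(x, 0) + 1
--     pairs = []
--     rest_ref = []
--     used = {}
--     for x in same_amount_reference:
--         if cnt.get(x, 0) > 0:
--             cnt[x] -= 1
--             used[x] = used.get(x, 0) + 1
--             pairs.append(x)
--         else:
--             rest_ref.append(x)
--     rest_date = []
--     for x in same_amount_date:
--         if used.get(x, 0) > 0:
--             used[x] -= 1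
--         else:
--             rest_date.append(x)
--     same_amount_date[:] = rest_date
--     same_amount_reference[:] = rest_ref
--     return pairs, same_amount_date, same_amount_reference
-- ===== Notes on version B (the rewrite author's own statement) =====
-- stated objective: faster
-- what changed: Replaces A's while-loop with in-place pop/remove and O(n) membership scans by a counter dict of date multiplicities and three linear passes (count, match reference, filter date).
import Mathlib
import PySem

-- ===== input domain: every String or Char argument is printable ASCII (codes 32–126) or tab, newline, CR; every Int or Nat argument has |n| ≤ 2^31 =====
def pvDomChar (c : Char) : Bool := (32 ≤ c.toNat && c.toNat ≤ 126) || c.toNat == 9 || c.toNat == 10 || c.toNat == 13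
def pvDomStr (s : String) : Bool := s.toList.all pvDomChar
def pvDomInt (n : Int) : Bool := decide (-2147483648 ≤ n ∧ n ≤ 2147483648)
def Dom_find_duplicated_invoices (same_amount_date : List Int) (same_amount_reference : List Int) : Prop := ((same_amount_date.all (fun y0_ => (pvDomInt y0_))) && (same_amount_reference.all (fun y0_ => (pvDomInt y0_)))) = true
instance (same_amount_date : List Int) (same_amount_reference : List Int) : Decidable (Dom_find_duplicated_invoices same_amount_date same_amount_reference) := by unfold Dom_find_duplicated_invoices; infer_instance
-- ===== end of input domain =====

-- B replaces A's quadratic while-loop (membership scan + pop + remove on every hit) by a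
-- multiplicity-counter dict and three linear passes; equivalence is about the RETURN value
-- (both Pythons also mutate their list arguments to the same final contents).

-- ===== PORT A =====
-- Python list.remove: drop the first element equal to x (A only calls it when x is present).
def pvRemoveFirst : List Int → Int → List Int
  | [], _ => []
  | y :: ys, x => if y = x then ys else y :: pvRemoveFirst ys x

-- the while-loop of A: state = (duplicated_pairs, same_amount_date, same_amount_reference, invoices_index)
def pvALoop (pairs date ref : List Int) (i : Nat) : List Int × List Int × List Int :=
  if h : i < ref.length then
    let x := ref[i]
    if x ∈ date then
      pvALoop (pairs ++ [x]) (pvRemoveFirst date x) (ref.eraseIdx i) i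
    else
      pvALoop pairs date ref (i + 1)
  else
    (pairs, date, ref)
termination_by ref.length - i
decreasing_by
  · have := List.length_eraseIdx_of_lt h; omega
  · omega

def find_duplicated_invoices (same_amount_date : List Int) (same_amount_reference : List Int) : List Int × List Int × List Int :=
  pvALoop [] same_amount_date same_amount_reference 0

-- ===== PORT B =====
-- cnt = {}; for x in same_amount_date: cnt[x] = cnt.get(x, 0) + 1
-- (second loop state: (cnt, used, pairs, rest_ref); third: (used, rest_date))
def find_duplicated_invoices_alt (same_amount_date : List Int) (same_amount_reference : List Int) : List Int × List Int × List Int :=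
  let cnt : PySem.Dict Int Int :=
    same_amount_date.foldl (fun d x => d.insert x (d.getD x 0 + 1)) PySem.Dict.empty
  let st :=
    same_amount_reference.foldl
      (fun (st : PySem.Dict Int Int × PySem.Dict Int Int × List Int × List Int) x =>
        let (cnt, used, pairs, rest) := st
        if cnt.getD x 0 > 0 then
          (cnt.insert x (cnt.getD x 0 - 1), used.insert x (used.getD x 0 + 1), pairs ++ [x], rest)
        else
          (cnt, used, pairs, rest ++ [x]))
      (cnt, PySem.Dict.empty, [], [])
  let t :=
    same_amount_date.foldl
      (fun (st : PySem.Dict Int Int × List Int) x =>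
        let (used, restd) := st
        if used.getD x 0 > 0 then (used.insert x (used.getD x 0 - 1), restd)
        else (used, restd ++ [x]))
      (st.2.1, [])
  (st.2.2.1, t.2, st.2.2.2)

-- ===== PRECONDITION & SPEC =====
def Spec_find_duplicated_invoices (same_amount_date : List Int) (same_amount_reference : List Int) (out : List Int × List Int × List Int) : Prop := out = find_duplicated_invoices_alt same_amount_date same_amount_reference
instance (same_amount_date : List Int) (same_amount_reference : List Int) (out : List Int × List Int × List Int) : Decidable (Spec_find_duplicated_invoices same_amount_date same_amount_reference out) := by unfold Spec_find_duplicated_invoices; infer_instance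

-- ===== CLAIM (what is proved, stated in full; the proofs are below) =====
def Claim_equal_find_duplicated_invoices : Prop := ∀ (same_amount_date : List Int) (same_amount_reference : List Int), Dom_find_duplicated_invoices same_amount_date same_amount_reference → Spec_find_duplicated_invoices same_amount_date same_amount_reference (find_duplicated_invoices same_amount_date same_amount_reference)

-- ===== LEMMAS AND PROOFS =====

-- common reference recursion: scan the reference list left to right, moving hits out of date
def pvScan : List Int → List Int → List Int × List Int × List Int
  | [], date => ([], date, [])
  | x :: xs, date =>
    if x ∈ date then
      let r := pvScan xs (pvRemoveFirst date x)
      (x :: r.1, r.2.1, r.2.2)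
    else
      let r := pvScan xs date
      (r.1, r.2.1, x :: r.2.2)

-- remove, per value v, the first (f v) occurrences of v
def pvFilterF (f : Int → Int) : List Int → List Int
  | [] => []
  | y :: ys => if f y > 0 then pvFilterF (fun w => if w = y then f y - 1 else f w) ys
               else y :: pvFilterF f ys

theorem aLoop_eq : ∀ (n : Nat) (ref date pairs : List Int) (i : Nat), ref.length - i ≤ n →
    pvALoop pairs date ref i =
      (pairs ++ (pvScan (ref.drop i) date).1,
       (pvScan (ref.drop i) date).2.1,
       ref.take i ++ (pvScan (ref.drop i) date).2.2) := by
  intro n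
  induction n with
  | zero =>
    intro ref date pairs i hle
    have hi : ¬ i < ref.length := by omega
    rw [pvALoop]
    simp only [hi, dite_false]
    rw [List.drop_eq_nil_of_le (by omega), List.take_of_length_le (by omega)]
    simp [pvScan]
  | succ n ih =>
    intro ref date pairs i hle
    rw [pvALoop]
    by_cases hi : i < ref.length
    · simp only [hi, dite_true]
      have hdrop : ref.drop i = ref[i] :: ref.drop (i + 1) := List.drop_eq_getElem_cons hi
      by_cases hmem : ref[i] ∈ date
      · simp only [hmem, if_true]
        have herase : ref.eraseIdx i = ref.take i ++ ref.drop (i + 1) :=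
          List.eraseIdx_eq_take_drop_succ ref i
        have hlen : (ref.take i).length = i := List.length_take_of_le (by omega)
        have hdrop' : (ref.eraseIdx i).drop i = ref.drop (i + 1) := by
          rw [herase]; exact List.drop_left' hlen
        have htake' : (ref.eraseIdx i).take i = ref.take i := by
          rw [herase]; exact List.take_left' hlen
        have hrec := ih (ref.eraseIdx i) (pvRemoveFirst date ref[i]) (pairs ++ [ref[i]]) i
          (by have := List.length_eraseIdx_of_lt hi; omega)
        rw [hrec, hdrop', htake', hdrop]
        simp [pvScan, hmem]
      · simp only [hmem, if_false]
        have hrec := ih ref date pairs (i + 1) (by omega)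
        rw [hrec, hdrop]
        simp only [pvScan, hmem, if_false]
        have htake : ref.take (i + 1) = ref.take i ++ [ref[i]] := by
          rw [List.take_add_one, List.getElem?_eq_getElem hi]; rfl
        rw [htake, List.append_assoc]
        rfl
    · simp only [hi, dite_false]
      rw [List.drop_eq_nil_of_le (by omega), List.take_of_length_le (by omega)]
      simp [pvScan]

theorem removeFirst_count (date : List Int) (x : Int) (h : x ∈ date) (v : Int) :
    (pvRemoveFirst date x).count v = date.count v - (if v = x then 1 else 0) := by
  induction date with
  | nil => cases h
  | cons y ys ih =>
    by_cases hyx : y = x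
    · subst hyx
      simp only [pvRemoveFirst, if_true]
      rcases eq_or_ne v y with rfl | hvy
      · simp [List.count_cons]
      · simp [List.count_cons, hvy, Ne.symm hvy]
    · simp only [pvRemoveFirst, hyx, if_false]
      have h' : x ∈ ys := by
        rcases List.mem_cons.mp h with h1 | h2
        · exact absurd h1.symm hyx
        · exact h2
      rcases eq_or_ne v y with rfl | hvy
      · have hvx : ¬ v = x := fun e => hyx e
        have hc : 1 ≤ ys.count v + 1 := by omega
        simp [List.count_cons, ih h', hvx]
      · simp [List.count_cons, ih h', Ne.symm hvy]

-- the second loop of B, related to pvScan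
theorem refFold_eq : ∀ (ref date : List Int) (cnt used : PySem.Dict Int Int)
    (pairs rest : List Int),
    (∀ v, cnt.getD v 0 = (date.count v : Int)) →
    (ref.foldl
      (fun (st : PySem.Dict Int Int × PySem.Dict Int Int × List Int × List Int) x =>
        let (cnt, used, pairs, rest) := st
        if cnt.getD x 0 > 0 then
          (cnt.insert x (cnt.getD x 0 - 1), used.insert x (used.getD x 0 + 1), pairs ++ [x], rest)
        else
          (cnt, used, pairs, rest ++ [x]))
      (cnt, used, pairs, rest)).2.2.1 = pairs ++ (pvScan ref date).1 ∧
    (ref.foldl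
      (fun (st : PySem.Dict Int Int × PySem.Dict Int Int × List Int × List Int) x =>
        let (cnt, used, pairs, rest) := st
        if cnt.getD x 0 > 0 then
          (cnt.insert x (cnt.getD x 0 - 1), used.insert x (used.getD x 0 + 1), pairs ++ [x], rest)
        else
          (cnt, used, pairs, rest ++ [x]))
      (cnt, used, pairs, rest)).2.2.2 = rest ++ (pvScan ref date).2.2 ∧
    (∀ v, (ref.foldl
      (fun (st : PySem.Dict Int Int × PySem.Dict Int Int × List Int × List Int) x =>
        let (cnt, used, pairs, rest) := st
        if cnt.getD x 0 > 0 then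
          (cnt.insert x (cnt.getD x 0 - 1), used.insert x (used.getD x 0 + 1), pairs ++ [x], rest)
        else
          (cnt, used, pairs, rest ++ [x]))
      (cnt, used, pairs, rest)).2.1.getD v 0 = used.getD v 0 + ((pvScan ref date).1.count v : Int)) := by
  intro ref
  induction ref with
  | nil =>
    intro date cnt used pairs rest _
    simp [pvScan]
  | cons x xs ih =>
    intro date cnt used pairs rest hc
    have hmem_iff : x ∈ date ↔ cnt.getD x 0 > 0 := by
      rw [hc x]
      constructor
      · intro h; exact_mod_cast List.count_pos_iff.mpr h
      · intro h; exact List.count_pos_iff.mp (by exact_mod_cast h)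
    by_cases hmem : x ∈ date
    · have hgt : cnt.getD x 0 > 0 := hmem_iff.mp hmem
      simp only [List.foldl_cons, hgt, if_true]
      have hc' : ∀ v, (cnt.insert x (cnt.getD x 0 - 1)).getD v 0 =
          ((pvRemoveFirst date x).count v : Int) := by
        intro v
        rw [PySem.Dict.getD_insert, removeFirst_count date x hmem v]
        by_cases hvx : v = x
        · subst hvx
          have hp : 0 < date.count v := List.count_pos_iff.mpr hmem
          simp only [if_true]
          rw [hc v]; push_cast [hp]; omega
        · simp only [hvx, if_false]
          rw [hc v]
          push_cast
          omega
      obtain ⟨h1, h2, h3⟩ := ih (pvRemoveFirst date x) (cnt.insert x (cnt.getD x 0 - 1))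
        (used.insert x (used.getD x 0 + 1)) (pairs ++ [x]) rest hc'
      refine ⟨?_, ?_, ?_⟩
      · rw [h1]; simp [pvScan, hmem]
      · rw [h2]; simp [pvScan, hmem]
      · intro v
        rw [h3 v, PySem.Dict.getD_insert]
        simp only [pvScan, hmem, if_true]
        by_cases hvx : v = x
        · subst hvx; simp [List.count_cons]; push_cast; ring
        · simp [List.count_cons, hvx, Ne.symm hvx]
    · have hle : ¬ cnt.getD x 0 > 0 := fun h => hmem (hmem_iff.mpr h)
      simp only [List.foldl_cons, hle, if_false]
      obtain ⟨h1, h2, h3⟩ := ih date cnt used pairs (rest ++ [x]) hc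
      refine ⟨?_, ?_, ?_⟩
      · rw [h1]; simp [pvScan, hmem]
      · rw [h2]; simp [pvScan, hmem]
      · intro v; rw [h3 v]; simp [pvScan, hmem]

-- the third loop of B computes pvFilterF of the used-counts
theorem dateFold_eq : ∀ (date : List Int) (used : PySem.Dict Int Int) (restd : List Int),
    (date.foldl
      (fun (st : PySem.Dict Int Int × List Int) x =>
        let (used, restd) := st
        if used.getD x 0 > 0 then (used.insert x (used.getD x 0 - 1), restd)
        else (used, restd ++ [x]))
      (used, restd)).2 = restd ++ pvFilterF (fun v => used.getD v 0) date := by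
  intro date
  induction date with
  | nil => intro used restd; simp [pvFilterF]
  | cons x xs ih =>
    intro used restd
    by_cases hgt : used.getD x 0 > 0
    · simp only [List.foldl_cons, hgt, if_true, pvFilterF]
      rw [ih]
      have hfun : (fun v => (used.insert x (used.getD x 0 - 1)).getD v 0)
          = (fun w => if w = x then used.getD x 0 - 1 else used.getD w 0) := by
        funext w
        rw [PySem.Dict.getD_insert]
      rw [hfun]
    · simp only [List.foldl_cons, hgt, if_false, pvFilterF]
      rw [ih]
      simp

theorem filterF_zero : ∀ (date : List Int), pvFilterF (fun _ => (0 : Int)) date = date := by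
  intro date
  induction date with
  | nil => rfl
  | cons y ys ih => simp [pvFilterF, ih]

theorem filterF_bump (x : Int) : ∀ (date : List Int) (f : Int → Int), (∀ v, 0 ≤ f v) →
    pvFilterF f (pvRemoveFirst date x) =
      pvFilterF (fun v => if v = x then f x + 1 else f v) date := by
  intro date
  induction date with
  | nil => intro f _; rfl
  | cons y ys ih =>
    intro f hf
    by_cases hyx : y = x
    · subst hyx
      rw [show pvRemoveFirst (y :: ys) y = ys from by simp [pvRemoveFirst]]
      have hpos : (if y = y then f y + 1 else f y) > 0 := by
        rw [if_pos rfl]; have := hf y; omega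
      conv_rhs => rw [pvFilterF]
      rw [if_pos hpos]
      have hfun : (fun w => if w = y then (if y = y then f y + 1 else f y) - 1 else if w = y then f y + 1 else f w) = f := by
        funext w
        by_cases hwy : w = y <;> simp [hwy]
      rw [hfun]
    · simp only [pvRemoveFirst, hyx, if_false]
      by_cases hfy : f y > 0
      · have hfy' : (if y = x then f x + 1 else f y) > 0 := by simp [hyx, hfy]
        simp only [pvFilterF, hfy, hfy', if_true]
        have := ih (fun w => if w = y then f y - 1 else f w)
          (by intro v; by_cases hvy : v = y <;> simp [hvy] <;> [omega; exact hf v])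
        rw [this]
        have hfun : (fun v => if v = x then (fun w => if w = y then f y - 1 else f w) x + 1 else if v = y then f y - 1 else f v)
            = (fun w => if w = y then (if y = x then f x + 1 else f y) - 1 else if w = x then f x + 1 else f w) := by
          funext w
          have hxy : ¬ x = y := fun e => hyx e.symm
          by_cases hwy : w = y
          · subst hwy; simp [hyx, hxy]
          · by_cases hwx : w = x <;> simp [hwy, hwx, hyx, hxy]
        rw [hfun]
      · have hfy' : ¬ (if y = x then f x + 1 else f y) > 0 := by simp [hyx, hfy]
        simp only [pvFilterF, hfy, hfy', if_false]
        rw [ih f hf]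

theorem scan_date_eq : ∀ (ref date : List Int),
    (pvScan ref date).2.1 =
      pvFilterF (fun v => ((pvScan ref date).1.count v : Int)) date := by
  intro ref
  induction ref with
  | nil =>
    intro date
    simp only [pvScan]
    rw [show (fun v => ((List.count v ([] : List Int) : Nat) : Int)) = fun _ => (0 : Int) by
      funext v; simp]
    exact (filterF_zero date).symm
  | cons x xs ih =>
    intro date
    by_cases hmem : x ∈ date
    · simp only [pvScan, hmem, if_true]
      rw [ih (pvRemoveFirst date x)]
      rw [filterF_bump x date _ (by intro v; positivity)]
      congr 1
      funext v
      by_cases hvx : v = x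
      · subst hvx; simp [List.count_cons]
      · simp [List.count_cons, hvx, Ne.symm hvx]
    · simp only [pvScan, hmem, if_false]
      exact ih date

theorem alt_eq_scan (date ref : List Int) :
    find_duplicated_invoices_alt date ref =
      ((pvScan ref date).1, (pvScan ref date).2.1, (pvScan ref date).2.2) := by
  unfold find_duplicated_invoices_alt
  have hc : ∀ v,
      (date.foldl (fun d x => d.insert x (d.getD x 0 + 1)) PySem.Dict.empty).getD v 0 =
        (date.count v : Int) := by
    intro v
    rw [PySem.Dict.getD_foldl_insert_add_one]
    simp
  obtain ⟨h1, h2, h3⟩ := refFold_eq ref date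
    (date.foldl (fun d x => d.insert x (d.getD x 0 + 1)) PySem.Dict.empty)
    PySem.Dict.empty [] [] hc
  simp only []
  rw [dateFold_eq, h1, h2]
  have hused : (fun v => (ref.foldl
      (fun (st : PySem.Dict Int Int × PySem.Dict Int Int × List Int × List Int) x =>
        let (cnt, used, pairs, rest) := st
        if cnt.getD x 0 > 0 then
          (cnt.insert x (cnt.getD x 0 - 1), used.insert x (used.getD x 0 + 1), pairs ++ [x], rest)
        else
          (cnt, used, pairs, rest ++ [x]))
      (date.foldl (fun d x => d.insert x (d.getD x 0 + 1)) PySem.Dict.empty,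
        PySem.Dict.empty, [], [])).2.1.getD v 0)
      = fun v => (((pvScan ref date).1.count v : Nat) : Int) := by
    funext v
    rw [h3 v]
    simp
  rw [hused, ← scan_date_eq]
  simp

-- ===== VERDICT (by name: the statement is the Claim_ definition above) =====
theorem find_duplicated_invoices_spec : Claim_equal_find_duplicated_invoices := by
  intro date ref _
  unfold Spec_find_duplicated_invoices
  rw [alt_eq_scan]
  unfold find_duplicated_invoices
  rw [aLoop_eq (ref.length) ref date [] 0 (by omega)]
  simp
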